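-- pv_equiv track=rewrite | github.com/Maegner/IA17-18 | projecto1/bot.py | isImpossible
-- ===== SOURCE A (Python) =====
-- def copyMatrix(matrix, matrixDest):
--     for line in range(len(matrix)):
--         lineVector = []
--         for column in range(len(matrix[0])):
--             lineVector.append(matrix[line][column])
--         matrixDest.append(lineVector)
--
-- def isImpossible(matrix):
--
--     groups = board_find_groups(matrix)
--
--     if len(groups) == 0:
--         return False
--
--     for group in groups:
--         if len(group) != 1:
--             return False
--     return True
--
-- def get_neighbours(pos,matrix,element,result):
--
--     # verfies if the element to the top of the refered position is equal to the element
--     if pos[0]-1 >= 0 :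
--         if element == matrix[pos[0]-1][pos[1]]:
--
--             nextPos = (pos[0]-1,pos[1])
--             matrix[pos[0]-1][pos[1]] = -1
--             result.append((pos[0]-1,pos[1]))
--             get_neighbours(nextPos,matrix,element,result)
--
--     # verfies if the element to the bottom of the refered position is equal to the element
--     if len(matrix) > pos[0]+1:
--         if element == matrix[pos[0]+1][pos[1]]:
--
--             nextPos = (pos[0]+1,pos[1])
--             matrix[pos[0]+1][pos[1]] = -1
--             result.append((pos[0]+1,pos[1]))
--             get_neighbours(nextPos,matrix,element,result)
--
--     # verfies if the element to the right of the refered position is equal to the element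
--     if len(matrix[pos[0]]) > pos[1]+1:
--         if element == matrix[pos[0]][pos[1]+1]:
--
--             nextPos = (pos[0],pos[1]+1)
--             matrix[pos[0]][pos[1]+1] = -1
--             result.append((pos[0],pos[1]+1))
--             get_neighbours(nextPos,matrix,element,result)
--
--
--     # verfies if the element to the left of the refered position is equal to the element
--     if  pos[1]-1 >= 0:
--         if element == matrix[pos[0]][pos[1]-1]:
--             nextPos = (pos[0],pos[1]-1)
--             matrix[pos[0]][pos[1]-1] = -1
--             result.append((pos[0],pos[1]-1))
--             get_neighbours(nextPos,matrix,element,result)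
--     return result
--
-- def board_find_groups(matrix):
--     matrixCopy = []
--     copyMatrix(matrix, matrixCopy)
--     result = []
--     l = 0
--     col = 0
--     for linha in matrixCopy:
--         for element in linha:
--             if element == -1 or element == 0:
--                 col+=1
--                 continue
--             matrixCopy[l][col] = -1
--             neighbours = get_neighbours((l,col),matrixCopy,element,[(l,col)])
--             if(len(neighbours) >= 1):
--                 result.append(neighbours)
--             col+=1
--         l+=1
--         col = 0
--     return result
-- ===== SOURCE B (Python) =====
-- def isImpossible(matrix):
--     # Single scan: impossible iff some occupied cell exists and no two equal
--     # occupied cells are adjacent (checking right/bottom neighbours covers all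
--     # adjacencies). Board width is given by the first row, as for A's board.
--     w = len(matrix[0]) if matrix else 0
--     hasOccupied = False
--     for i, row in enumerate(matrix):
--         for j in range(w):
--             v = row[j]
--             if v == 0 or v == -1:
--                 continue
--             hasOccupied = True
--             if j + 1 < w and row[j + 1] == v:
--                 return False
--             if i + 1 < len(matrix) and matrix[i + 1][j] == v:
--                 return False
--     return hasOccupied
-- ===== Notes on version B (the rewrite author's own statement) =====
-- stated objective: simpler
-- what changed: A extracts all connected groups with a recursive, matrix-mutating flood fill over a copied board and then checks that every group is a singleton; B does a single scan that returns False as soon as an occupied cell equals its right or bottom neighbour and otherwise reports whether any occupied cell was seen.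
import Mathlib
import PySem

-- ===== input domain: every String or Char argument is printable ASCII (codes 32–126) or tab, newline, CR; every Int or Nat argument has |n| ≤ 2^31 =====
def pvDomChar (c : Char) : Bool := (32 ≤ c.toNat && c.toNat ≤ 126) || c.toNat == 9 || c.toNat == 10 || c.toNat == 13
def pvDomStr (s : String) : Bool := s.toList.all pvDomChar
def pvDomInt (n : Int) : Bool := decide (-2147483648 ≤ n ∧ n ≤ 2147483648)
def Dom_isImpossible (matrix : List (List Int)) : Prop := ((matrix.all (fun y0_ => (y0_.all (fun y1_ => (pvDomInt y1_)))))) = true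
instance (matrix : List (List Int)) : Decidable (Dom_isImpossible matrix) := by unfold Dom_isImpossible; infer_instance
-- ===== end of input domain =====

-- B replaces A's mutating flood-fill group extraction by a single scan that looks only at
-- each occupied cell's right and bottom neighbour (objective: simpler; A mutates only its
-- private copy of the board, so no observable side effects are involved).

-- ===== PORT A =====

-- cell read `C[i][j]` (every read the ports perform is in range on admitted inputs;
-- out-of-range reads return the default 0, which never counts as occupied)
def cellG (C : List (List Int)) (i j : Nat) : Int := (C.getD i []).getD j 0

-- cell write `C[i][j] = v`
def cellSet (C : List (List Int)) (i j : Nat) (v : Int) : List (List Int) :=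
  C.set i ((C.getD i []).set j v)

-- copyMatrix: builds a len(matrix) × len(matrix[0]) copy (append loops become map over range;
-- exact on inputs admitted by Pre_, where every index matrix[line][column] is in range)
def copyMat (matrix : List (List Int)) : List (List Int) :=
  (List.range matrix.length).map (fun l =>
    (List.range (matrix.headD []).length).map (fun c => cellG matrix l c))

-- one of the four identical neighbour blocks of get_neighbours: check guard and equality on the
-- CURRENT matrix, mark the cell, append it, recurse (`rec` is the recursive call one fuel down)
def gnTry (rec : (Nat × Nat) → List (List Int) × List (Nat × Nat) → List (List Int) × List (Nat × Nat))
    (e : Int) (guard : List (List Int) → Bool) (q : Nat × Nat)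
    (st : List (List Int) × List (Nat × Nat)) : List (List Int) × List (Nat × Nat) :=
  if guard st.1 && (e == cellG st.1 q.1 q.2) then
    rec q (cellSet st.1 q.1 q.2 (-1), st.2 ++ [q])
  else st

-- get_neighbours: the state is (matrix, result); the fuel only makes the recursion structural,
-- it bounds the recursion depth and is never exhausted on the calls board_find_groups makes
-- (each nested call first turns one non-(-1) cell into -1, so depth ≤ #cells + 1 = the fuel passed)
def gn : Nat → Int → Nat × Nat → List (List Int) × List (Nat × Nat) → List (List Int) × List (Nat × Nat)
  | 0, _, _, st => st
  | fuel+1, e, (i, j), st =>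
    gnTry (gn fuel e) e (fun _ => decide (1 ≤ j)) (i, j-1)
      (gnTry (gn fuel e) e (fun C => decide (j+1 < (C.getD i []).length)) (i, j+1)
        (gnTry (gn fuel e) e (fun C => decide (i+1 < C.length)) (i+1, j)
          (gnTry (gn fuel e) e (fun _ => decide (1 ≤ i)) (i-1, j) st)))

-- body of board_find_groups' inner loop for one cell
def bfgCell (F : Nat) (C : List (List Int)) (res : List (List (Nat × Nat))) (l c : Nat) :
    List (List Int) × List (List (Nat × Nat)) :=
  let element := cellG C l c
  if element = -1 ∨ element = 0 then (C, res)
  else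
    let C1 := cellSet C l c (-1)
    let st := gn F element (l, c) (C1, [(l, c)])
    (st.1, if 1 ≤ st.2.length then res ++ [st.2] else res)

-- inner `for element in linha` loop: the count of remaining cells is explicit
-- (exact: mutation never changes row lengths, so the iteration count is fixed)
def bfgCols (F : Nat) : List (List Int) → List (List (Nat × Nat)) → Nat → Nat → Nat →
    List (List Int) × List (List (Nat × Nat))
  | C, res, _, _, 0 => (C, res)
  | C, res, l, c, k+1 =>
    let st := bfgCell F C res l c
    bfgCols F st.1 st.2 l (c+1) k

-- outer `for linha in matrixCopy` loop
def bfgRows (F : Nat) : List (List Int) → List (List (Nat × Nat)) → Nat → Nat →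
    List (List Int) × List (List (Nat × Nat))
  | C, res, _, 0 => (C, res)
  | C, res, l, k+1 =>
    let st := bfgCols F C res l 0 (C.getD l []).length
    bfgRows F st.1 st.2 (l+1) k

def board_find_groups (matrix : List (List Int)) : List (List (Nat × Nat)) :=
  let C := copyMat matrix
  (bfgRows (matrix.length * (matrix.headD []).length + 1) C [] 0 C.length).2

def isImpossible (matrix : List (List Int)) : Bool :=
  let groups := board_find_groups matrix
  if groups.length = 0 then false
  else groups.all (fun gr => gr.length == 1)

-- ===== PORT B =====

-- inner `for j in range(w)` loop of B; `none` models the early `return False`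
def altCols (m : List (List Int)) (w : Nat) (row : List Int) (i : Nat) :
    Nat → Nat → Bool → Option Bool
  | _, 0, h => some h
  | j, k+1, h =>
    let v := row.getD j 0
    if v = 0 ∨ v = -1 then altCols m w row i (j+1) k h
    else if j+1 < w ∧ row.getD (j+1) 0 = v then none
    else if i+1 < m.length ∧ (m.getD (i+1) []).getD j 0 = v then none
    else altCols m w row i (j+1) k true

-- outer `for i, row in enumerate(matrix)` loop of B, threading hasOccupied
def altRows (m : List (List Int)) (w : Nat) : List (List Int) → Nat → Bool → Bool
  | [], _, h => h
  | row :: rest, i, h =>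
    match altCols m w row i 0 w h with
    | none => false
    | some h' => altRows m w rest (i+1) h'

def isImpossible_alt (matrix : List (List Int)) : Bool :=
  altRows matrix (matrix.headD []).length matrix 0 false

-- ===== PRECONDITION & SPEC =====

-- Pre_ excludes exactly the inputs on which A raises IndexError: copyMatrix indexes every row
-- up to len(matrix[0]), so A raises iff some row is shorter than the first row.
def Pre_isImpossible (matrix : List (List Int)) : Prop :=
  ∀ row ∈ matrix, (matrix.headD []).length ≤ row.length
instance (matrix : List (List Int)) : Decidable (Pre_isImpossible matrix) := by
  unfold Pre_isImpossible; infer_instance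

def pvWitness_isImpossible : List (List Int) := [[1, 0], [0, 2]]

def Spec_isImpossible (matrix : List (List Int)) (out : Bool) : Prop := out = isImpossible_alt matrix
instance (matrix : List (List Int)) (out : Bool) : Decidable (Spec_isImpossible matrix out) := by
  unfold Spec_isImpossible; infer_instance

-- ===== CLAIM (what is proved, stated in full; the proofs are below) =====
def Claim_equal_isImpossible : Prop := ∀ (matrix : List (List Int)), Dom_isImpossible matrix → Pre_isImpossible matrix → Spec_isImpossible matrix (isImpossible matrix)

-- ===== LEMMAS AND PROOFS =====

-- an occupied cell value
abbrev occV (v : Int) : Prop := v ≠ 0 ∧ v ≠ -1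

-- cell (i,j) is occupied and agrees with its right or bottom neighbour
abbrev PairAt (m : List (List Int)) (w i j : Nat) : Prop :=
  i < m.length ∧ j < w ∧ occV (cellG m i j) ∧
    ((j+1 < w ∧ cellG m i (j+1) = cellG m i j) ∨ (i+1 < m.length ∧ cellG m (i+1) j = cellG m i j))

-- C is m with the occupied cells among the first k cells (row-major) replaced by -1
def IsMark (m : List (List Int)) (w k : Nat) (C : List (List Int)) : Prop :=
  C.length = m.length ∧ (∀ l, l < m.length → (C.getD l []).length = w) ∧
    ∀ i j, i < m.length → j < w →
      cellG C i j = if i * w + j < k ∧ occV (cellG m i j) then -1 else cellG m i j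

-- result invariant in the pair-free case
def Sinv (m : List (List Int)) (w k : Nat) (res : List (List (Nat × Nat))) : Prop :=
  (∀ gr ∈ res, gr.length = 1) ∧
    (res = [] ↔ ∀ i j, i < m.length → j < w → i * w + j < k → ¬ occV (cellG m i j))

def BigR (res : List (List (Nat × Nat))) : Prop := ∃ gr ∈ res, 2 ≤ gr.length

-- ---- basic facts ----

theorem flatIdx_div {w i j : Nat} (hj : j < w) : (i * w + j) / w = i ∧ (i * w + j) % w = j := by
  have hw : 0 < w := Nat.lt_of_le_of_lt (Nat.zero_le j) hj
  constructor
  · rw [Nat.mul_comm, Nat.mul_add_div hw, Nat.div_eq_of_lt hj, Nat.add_zero]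
  · rw [Nat.mul_comm, Nat.mul_add_mod, Nat.mod_eq_of_lt hj]

theorem flatIdx_inj {w i j l c : Nat} (hj : j < w) (hc : c < w)
    (h : i * w + j = l * w + c) : i = l ∧ j = c := by
  have h1 := flatIdx_div (i := i) hj
  have h2 := flatIdx_div (i := l) hc
  constructor
  · rw [← h1.1, h, h2.1]
  · rw [← h1.2, h, h2.2]

theorem cellSet_length (C : List (List Int)) (i j : Nat) (v : Int) :
    (cellSet C i j v).length = C.length := by
  simp [cellSet]

theorem cellSet_rowlen (C : List (List Int)) (i j : Nat) (v : Int) (l : Nat) :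
    ((cellSet C i j v).getD l []).length = (C.getD l []).length := by
  by_cases h : l = i
  · subst h
    by_cases hl : l < C.length
    · simp [cellSet, List.getD_eq_getElem?_getD, List.getElem?_set_self, hl]
    · simp [cellSet, List.getD_eq_getElem?_getD, List.getElem?_set,
        List.getElem?_eq_none (le_of_not_gt hl), hl]
  · simp [cellSet, List.getD_eq_getElem?_getD, List.getElem?_set_ne (fun he => h he.symm)]

theorem cellG_cellSet_self (C : List (List Int)) (i j : Nat) (v : Int)
    (hi : i < C.length) (hj : j < (C.getD i []).length) :
    cellG (cellSet C i j v) i j = v := by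
  have hg : C.getD i [] = C[i] := List.getD_eq_getElem C [] hi
  have hj2 : j < (C[i].set j v).length := by simpa using hg ▸ hj
  simp [cellG, cellSet, hg, List.getD_eq_getElem?_getD, List.getElem?_set_self, hi,
    List.getElem?_eq_getElem hj2, List.getElem_set_self hj2]

theorem cellG_cellSet_other (C : List (List Int)) (i j : Nat) (v : Int) (i' j' : Nat)
    (h : i ≠ i' ∨ j ≠ j') : cellG (cellSet C i j v) i' j' = cellG C i' j' := by
  rcases h with h | h
  · simp [cellG, cellSet, List.getD_eq_getElem?_getD, List.getElem?_set_ne h]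
  · by_cases hi : i = i'
    · subst hi
      by_cases hl : i < C.length
      · simp [cellG, cellSet, List.getD_eq_getElem?_getD, List.getElem?_set_self, hl,
          List.getElem?_eq_getElem hl, List.getD_eq_getElem?_getD, List.getElem?_set_ne h]
      · simp [cellG, cellSet, List.getD_eq_getElem?_getD, List.getElem?_set,
          List.getElem?_eq_none (le_of_not_gt hl), hl]
    · simp [cellG, cellSet, List.getD_eq_getElem?_getD, List.getElem?_set_ne hi]

-- ---- gn lemmas ----

theorem gnTry_ex (rec : (Nat × Nat) → List (List Int) × List (Nat × Nat) → List (List Int) × List (Nat × Nat))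
    (hrec : ∀ q st, ∃ ex, (rec q st).2 = st.2 ++ ex)
    (e : Int) (guard : List (List Int) → Bool) (q : Nat × Nat) (st : List (List Int) × List (Nat × Nat)) :
    ∃ ex, (gnTry rec e guard q st).2 = st.2 ++ ex := by
  unfold gnTry
  split
  · obtain ⟨ex, hex⟩ := hrec q (cellSet st.1 q.1 q.2 (-1), st.2 ++ [q])
    exact ⟨[q] ++ ex, by simp [hex]⟩
  · exact ⟨[], by simp⟩

theorem gnTry_lenmono (rec : (Nat × Nat) → List (List Int) × List (Nat × Nat) → List (List Int) × List (Nat × Nat))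
    (hrec : ∀ q st, ∃ ex, (rec q st).2 = st.2 ++ ex)
    (e : Int) (guard : List (List Int) → Bool) (q : Nat × Nat) (st : List (List Int) × List (Nat × Nat)) :
    st.2.length ≤ (gnTry rec e guard q st).2.length := by
  obtain ⟨ex, hex⟩ := gnTry_ex rec hrec e guard q st
  simp [hex]

theorem gnTry_dichot (rec : (Nat × Nat) → List (List Int) × List (Nat × Nat) → List (List Int) × List (Nat × Nat))
    (hrec : ∀ q st, ∃ ex, (rec q st).2 = st.2 ++ ex)
    (e : Int) (guard : List (List Int) → Bool) (q : Nat × Nat) (st : List (List Int) × List (Nat × Nat)) :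
    gnTry rec e guard q st = st ∨ st.2.length < (gnTry rec e guard q st).2.length := by
  unfold gnTry
  split
  · right
    obtain ⟨ex, hex⟩ := hrec q (cellSet st.1 q.1 q.2 (-1), st.2 ++ [q])
    simp [hex]
  · exact Or.inl rfl

theorem gnTry_fire (rec : (Nat × Nat) → List (List Int) × List (Nat × Nat) → List (List Int) × List (Nat × Nat))
    (hrec : ∀ q st, ∃ ex, (rec q st).2 = st.2 ++ ex)
    (e : Int) (guard : List (List Int) → Bool) (q : Nat × Nat) (st : List (List Int) × List (Nat × Nat))
    (h : (guard st.1 && (e == cellG st.1 q.1 q.2)) = true) :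
    st.2.length < (gnTry rec e guard q st).2.length := by
  unfold gnTry
  rw [if_pos h]
  obtain ⟨ex, hex⟩ := hrec q (cellSet st.1 q.1 q.2 (-1), st.2 ++ [q])
  simp [hex]

theorem gn_ex : ∀ (fuel : Nat) (e : Int) (p : Nat × Nat) (st : List (List Int) × List (Nat × Nat)),
    ∃ ex, (gn fuel e p st).2 = st.2 ++ ex := by
  intro fuel
  induction fuel with
  | zero => exact fun e p st => ⟨[], by simp [gn]⟩
  | succ n ih =>
    intro e p st
    obtain ⟨i, j⟩ := p
    obtain ⟨e1, h1⟩ := gnTry_ex (gn n e) (ih e) e (fun _ => decide (1 ≤ i)) (i-1, j) st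
    obtain ⟨e2, h2⟩ := gnTry_ex (gn n e) (ih e) e (fun C => decide (i+1 < C.length)) (i+1, j)
      (gnTry (gn n e) e (fun _ => decide (1 ≤ i)) (i-1, j) st)
    obtain ⟨e3, h3⟩ := gnTry_ex (gn n e) (ih e) e (fun C => decide (j+1 < (C.getD i []).length)) (i, j+1)
      (gnTry (gn n e) e (fun C => decide (i+1 < C.length)) (i+1, j)
        (gnTry (gn n e) e (fun _ => decide (1 ≤ i)) (i-1, j) st))
    obtain ⟨e4, h4⟩ := gnTry_ex (gn n e) (ih e) e (fun _ => decide (1 ≤ j)) (i, j-1)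
      (gnTry (gn n e) e (fun C => decide (j+1 < (C.getD i []).length)) (i, j+1)
        (gnTry (gn n e) e (fun C => decide (i+1 < C.length)) (i+1, j)
          (gnTry (gn n e) e (fun _ => decide (1 ≤ i)) (i-1, j) st)))
    refine ⟨e1 ++ e2 ++ e3 ++ e4, ?_⟩
    simp only [gn, h4, h3, h2, h1, List.append_assoc]

theorem gn_nofire (fuel : Nat) (e : Int) (i j : Nat) (st : List (List Int) × List (Nat × Nat))
    (hup : 1 ≤ i → cellG st.1 (i-1) j ≠ e)
    (hdn : i+1 < st.1.length → cellG st.1 (i+1) j ≠ e)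
    (hrt : j+1 < (st.1.getD i []).length → cellG st.1 i (j+1) ≠ e)
    (hlt : 1 ≤ j → cellG st.1 i (j-1) ≠ e) :
    gn fuel e (i, j) st = st := by
  cases fuel with
  | zero => simp [gn]
  | succ n =>
    have c1 : (decide (1 ≤ i) && (e == cellG st.1 (i-1) j)) = false := by
      by_cases h : 1 ≤ i
      · simp [h, beq_iff_eq, Ne.symm (hup h)]
      · rw [decide_eq_false h, Bool.false_and]
    have c2 : (decide (i+1 < st.1.length) && (e == cellG st.1 (i+1) j)) = false := by
      by_cases h : i+1 < st.1.length
      · simp [h, beq_iff_eq, Ne.symm (hdn h)]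
      · rw [decide_eq_false h, Bool.false_and]
    have c3 : (decide (j+1 < (st.1.getD i []).length) && (e == cellG st.1 i (j+1))) = false := by
      by_cases h : j+1 < (st.1.getD i []).length
      · simp [h, beq_iff_eq, Ne.symm (hrt h)]
      · rw [decide_eq_false h, Bool.false_and]
    have c4 : (decide (1 ≤ j) && (e == cellG st.1 i (j-1))) = false := by
      by_cases h : 1 ≤ j
      · simp [h, beq_iff_eq, Ne.symm (hlt h)]
      · rw [decide_eq_false h, Bool.false_and]
    simp only [gn, gnTry, c1, c2, c3, c4, Bool.false_eq_true, if_false]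

theorem gn_grow (fuel : Nat) (e : Int) (i j : Nat) (st : List (List Int) × List (Nat × Nat))
    (h : (i+1 < st.1.length ∧ cellG st.1 (i+1) j = e) ∨
         (j+1 < (st.1.getD i []).length ∧ cellG st.1 i (j+1) = e)) :
    st.2.length < (gn (fuel+1) e (i, j) st).2.length := by
  have mono := fun guard q st' => gnTry_lenmono (gn fuel e) (gn_ex fuel e) e guard q st'
  simp only [gn]
  rcases gnTry_dichot (gn fuel e) (gn_ex fuel e) e (fun _ => decide (1 ≤ i)) (i-1, j) st with h1 | h1
  · rw [h1]
    rcases h with ⟨hg, he⟩ | ⟨hg, he⟩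
    · -- bottom neighbour fires (unless an earlier stage cannot: it is first after up)
      have hf : ((fun (C : List (List Int)) => decide (i+1 < C.length)) st.1 &&
          (e == cellG st.1 (i+1) j)) = true := by simp [hg, beq_iff_eq, he.symm]
      have := gnTry_fire (gn fuel e) (gn_ex fuel e) e
        (fun C => decide (i+1 < C.length)) (i+1, j) st hf
      calc st.2.length < _ := this
        _ ≤ _ := mono _ _ _
        _ ≤ _ := mono _ _ _
    · rcases gnTry_dichot (gn fuel e) (gn_ex fuel e) e
        (fun C => decide (i+1 < C.length)) (i+1, j) st with h2 | h2
      · rw [h2]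
        have hf : ((fun (C : List (List Int)) => decide (j+1 < (C.getD i []).length)) st.1 &&
            (e == cellG st.1 i (j+1))) = true := by
          simp only [Bool.and_eq_true, beq_iff_eq]
          exact ⟨by rw [decide_eq_true_eq]; simpa [List.getD_eq_getElem?_getD] using hg, he.symm⟩
        have := gnTry_fire (gn fuel e) (gn_ex fuel e) e
          (fun C => decide (j+1 < (C.getD i []).length)) (i, j+1) st hf
        calc st.2.length < _ := this
          _ ≤ _ := mono _ _ _
      · calc st.2.length < _ := h2
          _ ≤ _ := mono _ _ _
          _ ≤ _ := mono _ _ _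
  · calc st.2.length < _ := h1
      _ ≤ _ := mono _ _ _
      _ ≤ _ := mono _ _ _
      _ ≤ _ := mono _ _ _

-- ---- bfgCell lemmas ----

theorem bfgCell_ex (F : Nat) (C : List (List Int)) (res : List (List (Nat × Nat))) (l c : Nat) :
    ∃ ex, (bfgCell F C res l c).2 = res ++ ex := by
  by_cases h : cellG C l c = -1 ∨ cellG C l c = 0
  · exact ⟨[], by simp [bfgCell, h]⟩
  · by_cases h2 : 1 ≤ (gn F (cellG C l c) (l, c) (cellSet C l c (-1), [(l, c)])).2.length
    · exact ⟨[(gn F (cellG C l c) (l, c) (cellSet C l c (-1), [(l, c)])).2],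
        by simp [bfgCell, h, h2]⟩
    · exact ⟨[], by simp [bfgCell, h, h2]⟩

-- marking the current occupied cell preserves the IsMark invariant one step further
theorem cellSet_mark (m : List (List Int)) (w k : Nat) (C : List (List Int)) (l c : Nat)
    (hm : IsMark m w k C) (hl : l < m.length) (hc : c < w) (hk : k = l * w + c)
    (hocc : occV (cellG m l c)) :
    IsMark m w (k+1) (cellSet C l c (-1)) := by
  obtain ⟨hlen, hrow, hval⟩ := hm
  refine ⟨by rw [cellSet_length, hlen], fun l' hl' => by rw [cellSet_rowlen]; exact hrow l' hl', ?_⟩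
  intro i j hi hj
  by_cases hij : i = l ∧ j = c
  · obtain ⟨rfl, rfl⟩ := hij
    rw [cellG_cellSet_self C i j (-1) (by omega) (by rw [hrow i hi]; exact hj)]
    have : i * w + j < k + 1 := by omega
    simp [this, hocc]
  · have hne : l ≠ i ∨ c ≠ j := by
      rcases Decidable.not_and_iff_not_or_not.mp hij with h | h
      · exact Or.inl (fun he => h he.symm)
      · exact Or.inr (fun he => h he.symm)
    rw [cellG_cellSet_other C l c (-1) i j hne, hval i j hi hj]
    have hidx : i * w + j ≠ k := by
      intro he
      have := flatIdx_inj hj hc (by omega : i * w + j = l * w + c)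
      exact absurd ⟨this.1, this.2⟩ hij
    by_cases h1 : i * w + j < k ∧ occV (cellG m i j)
    · rw [if_pos h1, if_pos ⟨by omega, h1.2⟩]
    · have h2 : ¬(i * w + j < k + 1 ∧ occV (cellG m i j)) := by
        rintro ⟨ha, hb⟩
        exact h1 ⟨by omega, hb⟩
      rw [if_neg h1, if_neg h2]

theorem bfgCell_step (m : List (List Int)) (w k F : Nat) (C : List (List Int))
    (res : List (List (Nat × Nat))) (l c : Nat)
    (hm : IsMark m w k C) (hl : l < m.length) (hc : c < w) (hk : k = l * w + c)
    (hnp : ∀ i j, i * w + j ≤ k → ¬ PairAt m w i j) :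
    IsMark m w (k+1) (bfgCell F C res l c).1 ∧
      (bfgCell F C res l c).2 = res ++ (if occV (cellG m l c) then [[(l, c)]] else []) := by
  obtain ⟨hlen, hrow, hval⟩ := hm
  have hCl : cellG C l c = cellG m l c := by
    rw [hval l c hl hc]
    simp [(show ¬(l * w + c < k) by omega)]
  by_cases hocc : occV (cellG m l c)
  · -- occupied: the cell is marked, get_neighbours finds no equal neighbour, a singleton is appended
    set e := cellG m l c with he
    have hcond : ¬(cellG C l c = -1 ∨ cellG C l c = 0) := by
      rw [hCl]
      rintro (h | h)
      · exact hocc.2 h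
      · exact hocc.1 h
    have hmark1 : IsMark m w (k+1) (cellSet C l c (-1)) :=
      cellSet_mark m w k C l c ⟨hlen, hrow, hval⟩ hl hc hk hocc
    have h1val := hmark1.2.2
    -- the marked copy holds no neighbour of (l,c) equal to e: a -1 is never e, and an
    -- unmarked equal neighbour would give a pair with flat index ≤ k, excluded by hnp
    have hval_ne : ∀ i j, i < m.length → j < w → (cellG m i j = e → False) →
        cellG (cellSet C l c (-1)) i j ≠ e := by
      intro i j hi hj hno
      rw [h1val i j hi hj]
      split
      · exact fun h' => hocc.2 h'.symm
      · exact fun hev => hno hev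
    have hocc_e : ∀ i j, cellG m i j = e → occV (cellG m i j) := by
      intro i j hev
      rw [hev]
      exact hocc
    have hnofire := gn_nofire F e l c (cellSet C l c (-1), [(l, c)])
      (by -- up
        intro h1
        refine hval_ne (l-1) c (by omega) hc (fun hev => ?_)
        have hll : l - 1 + 1 = l := by omega
        refine hnp (l-1) c ?_ ⟨by omega, hc, hocc_e _ _ hev, Or.inr ⟨by omega, ?_⟩⟩
        · have := Nat.mul_le_mul_right w (Nat.sub_le l 1)
          omega
        · rw [hll, hev, he])
      (by -- down
        intro h1
        rw [cellSet_length, hlen] at h1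
        refine hval_ne (l+1) c h1 hc (fun hev => ?_)
        exact hnp l c (by omega) ⟨hl, hc, hocc, Or.inr ⟨h1, by rw [hev, he]⟩⟩)
      (by -- right
        intro h1
        rw [hmark1.2.1 l hl] at h1
        refine hval_ne l (c+1) hl h1 (fun hev => ?_)
        exact hnp l c (by omega) ⟨hl, hc, hocc, Or.inl ⟨h1, by rw [hev, he]⟩⟩)
      (by -- left
        intro h1
        refine hval_ne l (c-1) hl (by omega) (fun hev => ?_)
        have hcc : c - 1 + 1 = c := by omega
        refine hnp l (c-1) (by omega) ⟨hl, by omega, hocc_e _ _ hev, Or.inl ⟨by omega, ?_⟩⟩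
        rw [hcc, hev, he])
    have heq : bfgCell F C res l c = (cellSet C l c (-1), res ++ [[(l, c)]]) := by
      simp only [bfgCell, hCl, ← he]
      rw [if_neg (by rw [hCl] at hcond; exact hcond)]
      rw [hnofire]
      simp
    rw [heq]
    exact ⟨hmark1, by simp [hocc]⟩
  · -- empty cell: nothing happens
    have hcond : cellG C l c = -1 ∨ cellG C l c = 0 := by
      rw [hCl]
      rcases Decidable.not_and_iff_not_or_not.mp hocc with h | h
      · exact Or.inr (Decidable.not_not.mp h)
      · exact Or.inl (Decidable.not_not.mp h)
    have heq : bfgCell F C res l c = (C, res) := by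
      simp [bfgCell, hcond]
    rw [heq]
    refine ⟨⟨hlen, hrow, ?_⟩, by simp [hocc]⟩
    intro i j hi hj
    rw [hval i j hi hj]
    have hidx : i * w + j = k → ¬ occV (cellG m i j) := by
      intro he
      have := flatIdx_inj hj hc (by omega : i * w + j = l * w + c)
      rw [this.1, this.2]
      exact hocc
    by_cases h1 : i * w + j < k ∧ occV (cellG m i j)
    · rw [if_pos h1, if_pos ⟨by omega, h1.2⟩]
    · have h2 : ¬(i * w + j < k + 1 ∧ occV (cellG m i j)) := by
        rintro ⟨ha, hb⟩
        rcases Nat.lt_succ_iff_lt_or_eq.mp ha with h | h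
        · exact h1 ⟨h, hb⟩
        · exact hidx h hb
      rw [if_neg h1, if_neg h2]

theorem bfgCell_pair (m : List (List Int)) (w k F : Nat) (C : List (List Int))
    (res : List (List (Nat × Nat))) (l c : Nat)
    (hm : IsMark m w k C) (hk : k = l * w + c) (hp : PairAt m w l c) :
    ∃ ns, (bfgCell (F+1) C res l c).2 = res ++ [ns] ∧ 2 ≤ ns.length := by
  obtain ⟨hl, hc, hocc', hdir⟩ := hp
  obtain ⟨hlen, hrow, hval⟩ := hm
  have hCl : cellG C l c = cellG m l c := by
    rw [hval l c hl hc]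
    simp [(show ¬(l * w + c < k) by omega)]
  set e := cellG m l c with he
  have hocc : occV e := hocc'
  have hcond : ¬(cellG C l c = -1 ∨ cellG C l c = 0) := by
    rw [hCl]
    rintro (h | h)
    · exact hocc.2 h
    · exact hocc.1 h
  have hmark1 : IsMark m w (k+1) (cellSet C l c (-1)) :=
    cellSet_mark m w k C l c ⟨hlen, hrow, hval⟩ hl hc hk hocc
  have h1val := hmark1.2.2
  have hw : 0 < w := by omega
  have hgrow' : (l+1 < (cellSet C l c (-1)).length ∧ cellG (cellSet C l c (-1)) (l+1) c = e) ∨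
      (c+1 < ((cellSet C l c (-1)).getD l []).length ∧ cellG (cellSet C l c (-1)) l (c+1) = e) := by
    rcases hdir with ⟨hg, hev⟩ | ⟨hg, hev⟩
    · -- right neighbour equal
      refine Or.inr ⟨by rw [hmark1.2.1 l hl]; exact hg, ?_⟩
      rw [h1val l (c+1) hl hg, if_neg (by rintro ⟨ha, -⟩; omega)]
      exact hev
    · -- bottom neighbour equal
      refine Or.inl ⟨by rw [cellSet_length, hlen]; exact hg, ?_⟩
      rw [h1val (l+1) c hg hc, if_neg (by rintro ⟨ha, -⟩; nlinarith)]
      exact hev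
  have hgrow := gn_grow F e l c (cellSet C l c (-1), [(l, c)]) hgrow'
  refine ⟨(gn (F+1) e (l, c) (cellSet C l c (-1), [(l, c)])).2, ?_, by simpa using hgrow⟩
  rw [hCl] at hcond
  simp only [bfgCell, hCl, ← he]
  rw [if_neg hcond, if_pos (by simpa using Nat.le_of_lt hgrow)]

-- ---- loop lemmas, pair-free case ----

theorem bfgCols_np (m : List (List Int)) (w F : Nat) (l : Nat)
    (NP : ∀ i j, ¬ PairAt m w i j) (hl : l < m.length) :
    ∀ (cnt c : Nat) (C : List (List Int)) (res : List (List (Nat × Nat))),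
      c + cnt = w → IsMark m w (l * w + c) C → Sinv m w (l * w + c) res →
      IsMark m w (l * w + w) (bfgCols F C res l c cnt).1 ∧
        Sinv m w (l * w + w) (bfgCols F C res l c cnt).2 := by
  intro cnt
  induction cnt with
  | zero =>
    intro c C res hcw hM hS
    have : c = w := by omega
    subst this
    simpa [bfgCols] using ⟨hM, hS⟩
  | succ n ih =>
    intro c C res hcw hM hS
    have hc : c < w := by omega
    obtain ⟨hstep1, hstep2⟩ := bfgCell_step m w (l * w + c) F C res l c hM hl hc rfl
      (fun i j _ hpair => NP i j hpair)
    have hS' : Sinv m w (l * w + c + 1) (bfgCell F C res l c).2 := by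
      rw [hstep2]
      obtain ⟨hsing, hemp⟩ := hS
      by_cases hocc : occV (cellG m l c)
      · rw [if_pos hocc]
        refine ⟨?_, ?_⟩
        · intro gr hgr
          rcases List.mem_append.mp hgr with h | h
          · exact hsing gr h
          · simp at h
            simp [h]
        · refine ⟨fun h => absurd h (by simp), fun hall => ?_⟩
          exact absurd hocc (hall l c hl hc (by omega))
      · rw [if_neg hocc]
        simp only [List.append_nil]
        refine ⟨hsing, hemp.trans ⟨fun hall i j hi hj hidx => ?_, fun hall i j hi hj hidx => hall i j hi hj (by omega)⟩⟩
        rcases Nat.lt_succ_iff_lt_or_eq.mp hidx with h | h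
        · exact hall i j hi hj h
        · obtain ⟨rfl, rfl⟩ := flatIdx_inj hj hc h
          exact hocc
    have hres := ih (c+1) (bfgCell F C res l c).1 (bfgCell F C res l c).2 (by omega)
      (by have : l * w + (c + 1) = l * w + c + 1 := by omega
          rw [this]; exact hstep1)
      (by have : l * w + (c + 1) = l * w + c + 1 := by omega
          rw [this]; exact hS')
    simpa [bfgCols] using hres

theorem bfgRows_np (m : List (List Int)) (w F : Nat)
    (NP : ∀ i j, ¬ PairAt m w i j) :
    ∀ (cnt l : Nat) (C : List (List Int)) (res : List (List (Nat × Nat))),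
      l + cnt = m.length → IsMark m w (l * w) C → Sinv m w (l * w) res →
      Sinv m w (m.length * w) (bfgRows F C res l cnt).2 := by
  intro cnt
  induction cnt with
  | zero =>
    intro l C res hl hM hS
    have : l = m.length := by omega
    subst this
    simpa [bfgRows] using hS
  | succ n ih =>
    intro l C res hl hM hS
    have hlm : l < m.length := by omega
    have hrw : (C[l]?.getD []).length = w := by
      simpa [List.getD_eq_getElem?_getD] using hM.2.1 l hlm
    obtain ⟨hM', hS'⟩ := bfgCols_np m w F l NP hlm w 0 C res (by omega)
      (by simpa using hM) (by simpa using hS)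
    have hlw : l * w + w = (l + 1) * w := by ring
    rw [hlw] at hM' hS'
    have hres := ih (l+1) _ _ (by omega) hM' hS'
    simpa [bfgRows, hrw] using hres

-- ---- loop lemmas, pair case ----

theorem bfgCols_big (F : Nat) :
    ∀ (cnt c l : Nat) (C : List (List Int)) (res : List (List (Nat × Nat))),
      BigR res → BigR (bfgCols F C res l c cnt).2 := by
  intro cnt
  induction cnt with
  | zero => intro c l C res h; simpa [bfgCols] using h
  | succ n ih =>
    intro c l C res h
    obtain ⟨ex, hex⟩ := bfgCell_ex F C res l c
    have hbig : BigR (bfgCell F C res l c).2 := by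
      obtain ⟨gr, hgr, hlen⟩ := h
      exact ⟨gr, by rw [hex]; exact List.mem_append_left ex hgr, hlen⟩
    simpa [bfgCols] using ih (c+1) l _ _ hbig

theorem bfgRows_big (F : Nat) :
    ∀ (cnt l : Nat) (C : List (List Int)) (res : List (List (Nat × Nat))),
      BigR res → BigR (bfgRows F C res l cnt).2 := by
  intro cnt
  induction cnt with
  | zero => intro l C res h; simpa [bfgRows] using h
  | succ n ih =>
    intro l C res h
    have hbig := bfgCols_big F (C.getD l []).length 0 l C res h
    simpa [bfgRows] using ih (l+1) _ _ hbig

theorem bfgCols_pair (m : List (List Int)) (w F : Nat) (k0 : Nat) (l : Nat)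
    (hmin : ∀ i j, PairAt m w i j → k0 ≤ i * w + j)
    (hp0 : PairAt m w (k0 / w) (k0 % w)) (hl : l < m.length) :
    ∀ (cnt c : Nat) (C : List (List Int)) (res : List (List (Nat × Nat))),
      c + cnt = w → l * w + c ≤ k0 → IsMark m w (l * w + c) C →
      BigR (bfgCols (F+1) C res l c cnt).2 ∨
        (l * w + w ≤ k0 ∧ IsMark m w (l * w + w) (bfgCols (F+1) C res l c cnt).1) := by
  intro cnt
  induction cnt with
  | zero =>
    intro c C res hcw hk0 hM
    have : c = w := by omega
    subst this
    exact Or.inr ⟨hk0, by simpa [bfgCols] using hM⟩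
  | succ n ih =>
    intro c C res hcw hk0 hM
    have hc : c < w := by omega
    by_cases hkk : l * w + c = k0
    · -- reached the minimal pair cell: flood fill returns a group of size ≥ 2
      have hdiv := flatIdx_div (i := l) hc
      have hp : PairAt m w l c := by
        have h1 : k0 / w = l := by rw [← hkk]; exact hdiv.1
        have h2 : k0 % w = c := by rw [← hkk]; exact hdiv.2
        rw [← h1, ← h2]
        exact hp0
      obtain ⟨ns, hns, hns2⟩ := bfgCell_pair m w (l * w + c) F C res l c hM rfl hp
      have hbig : BigR (bfgCell (F+1) C res l c).2 := by
        rw [hns]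
        exact ⟨ns, by simp, hns2⟩
      exact Or.inl (by simpa [bfgCols] using bfgCols_big (F+1) n (c+1) l _ _ hbig)
    · have hlt : l * w + c < k0 := by omega
      obtain ⟨hstep1, hstep2⟩ := bfgCell_step m w (l * w + c) (F+1) C res l c hM hl hc rfl
        (fun i j hle hpair => by have := hmin i j hpair; omega)
      have hres := ih (c+1) (bfgCell (F+1) C res l c).1 (bfgCell (F+1) C res l c).2 (by omega)
        (by omega)
        (by have : l * w + (c + 1) = l * w + c + 1 := by omega
            rw [this]; exact hstep1)
      simpa [bfgCols] using hres

theorem bfgRows_pair (m : List (List Int)) (w F : Nat) (k0 : Nat)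
    (hmin : ∀ i j, PairAt m w i j → k0 ≤ i * w + j)
    (hp0 : PairAt m w (k0 / w) (k0 % w)) :
    ∀ (cnt l : Nat) (C : List (List Int)) (res : List (List (Nat × Nat))),
      l + cnt = m.length → l * w ≤ k0 → IsMark m w (l * w) C →
      BigR (bfgRows (F+1) C res l cnt).2 ∨ m.length * w ≤ k0 := by
  intro cnt
  induction cnt with
  | zero =>
    intro l C res hl hk0 hM
    have : l = m.length := by omega
    subst this
    exact Or.inr hk0
  | succ n ih =>
    intro l C res hl hk0 hM
    have hlm : l < m.length := by omega
    have hrw : (C[l]?.getD []).length = w := by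
      simpa [List.getD_eq_getElem?_getD] using hM.2.1 l hlm
    rcases bfgCols_pair m w F k0 l hmin hp0 hlm w 0 C res (by omega) (by simpa using hk0)
        (by simpa using hM) with hbig | ⟨hle, hM'⟩
    · exact Or.inl (by simpa [bfgRows, hrw] using bfgRows_big (F+1) n (l+1) _ _ hbig)
    · have hlw : l * w + w = (l + 1) * w := by ring
      rw [hlw] at hle hM'
      have := ih (l+1) (bfgCols (F+1) C res l 0 w).1 (bfgCols (F+1) C res l 0 w).2
        (by omega) hle hM'
      simpa [bfgRows, hrw] using this

-- ---- copy lemma ----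

theorem getD_map_range {α : Type} (n : Nat) (f : Nat → α) (d : α) (l : Nat) (hl : l < n) :
    (((List.range n).map f).getD l d) = f l := by
  simp [List.getD_eq_getElem?_getD, List.getElem?_range, hl]

theorem copyMat_mark (m : List (List Int)) :
    IsMark m (m.headD []).length 0 (copyMat m) := by
  refine ⟨by simp [copyMat], ?_, ?_⟩
  · intro l hl
    rw [copyMat, getD_map_range _ _ _ _ hl]
    simp
  · intro i j hi hj
    simp only [copyMat, cellG]
    rw [getD_map_range _ _ _ _ hi, getD_map_range _ _ _ _ hj]
    simp

-- ---- B-side lemmas ----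

theorem altCols_np (m : List (List Int)) (w i : Nat) (hi : i < m.length) :
    ∀ (k j : Nat) (h : Bool), j + k ≤ w → (∀ t, t < k → ¬ PairAt m w i (j+t)) →
      altCols m w (m.getD i []) i j k h =
        some (h || decide (∃ t < k, occV (cellG m i (j+t)))) := by
  intro k
  induction k with
  | zero => intro j h _ _; simp [altCols]
  | succ n ih =>
    intro j h hjk hnp
    have hjw : j < w := by omega
    by_cases hv : (m.getD i []).getD j 0 = 0 ∨ (m.getD i []).getD j 0 = -1
    · -- empty cell
      have hnocc : ¬ occV (cellG m i j) := by
        rcases hv with h' | h'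
        · exact fun ho => ho.1 h'
        · exact fun ho => ho.2 h'
      have hrec := ih (j+1) h (by omega)
        (fun t ht => by
          have := hnp (t+1) (by omega)
          simpa [show j + (t+1) = j+1+t by omega] using this)
      have hiff : (∃ t < n+1, occV (cellG m i (j+t))) ↔ (∃ t < n, occV (cellG m i (j+1+t))) := by
        constructor
        · rintro ⟨t, ht, ho⟩
          match t with
          | 0 => exact absurd (by simpa using ho) hnocc
          | t+1 => exact ⟨t, by omega, by simpa [show j+1+t = j+(t+1) by omega] using ho⟩
        · rintro ⟨t, ht, ho⟩
          exact ⟨t+1, by omega, by simpa [show j+(t+1) = j+1+t by omega] using ho⟩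
      simp only [altCols, if_pos hv, hrec]
      have hdd : decide (∃ t < n, occV (cellG m i (j+1+t))) = decide (∃ t < n+1, occV (cellG m i (j+t))) :=
        decide_eq_decide.mpr hiff.symm
      rw [hdd]
    · have hocc : occV (cellG m i j) := by
        constructor
        · exact fun h' => hv (Or.inl h')
        · exact fun h' => hv (Or.inr h')
      have hc2 : ¬ (j+1 < w ∧ (m.getD i []).getD (j+1) 0 = (m.getD i []).getD j 0) := by
        rintro ⟨hg, hev⟩
        exact hnp 0 (by omega) (by simpa using (⟨hi, hjw, hocc, Or.inl ⟨hg, hev⟩⟩ : PairAt m w i j))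
      have hc3 : ¬ (i+1 < m.length ∧ (m.getD (i+1) []).getD j 0 = (m.getD i []).getD j 0) := by
        rintro ⟨hg, hev⟩
        exact hnp 0 (by omega) (by simpa using (⟨hi, hjw, hocc, Or.inr ⟨hg, hev⟩⟩ : PairAt m w i j))
      have hrec := ih (j+1) true (by omega)
        (fun t ht => by
          have := hnp (t+1) (by omega)
          simpa [show j + (t+1) = j+1+t by omega] using this)
      have hx : (∃ t < n+1, occV (cellG m i (j+t))) := ⟨0, by omega, by simpa using hocc⟩
      simp only [altCols, if_neg hv, if_neg hc2, if_neg hc3, hrec]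
      rw [decide_eq_true hx]
      simp

theorem altCols_pair (m : List (List Int)) (w i : Nat) :
    ∀ (k j : Nat) (h : Bool), j + k ≤ w → (∃ t, t < k ∧ PairAt m w i (j+t)) →
      altCols m w (m.getD i []) i j k h = none := by
  intro k
  induction k with
  | zero => rintro j h _ ⟨t, ht, -⟩; omega
  | succ n ih =>
    rintro j h hjk ⟨t, ht, hp⟩
    have hjw : j < w := by omega
    have hi : i < m.length := hp.1
    by_cases hp0 : PairAt m w i j
    · obtain ⟨-, -, hocc, hdir⟩ := hp0
      have hv : ¬ ((m.getD i []).getD j 0 = 0 ∨ (m.getD i []).getD j 0 = -1) := by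
        rintro (h' | h')
        · exact hocc.1 h'
        · exact hocc.2 h'
      by_cases hc2 : (j+1 < w ∧ (m.getD i []).getD (j+1) 0 = (m.getD i []).getD j 0)
      · simp only [altCols, if_neg hv, if_pos hc2]
      · have hc3 : (i+1 < m.length ∧ (m.getD (i+1) []).getD j 0 = (m.getD i []).getD j 0) := by
          rcases hdir with hd | hd
          · exact absurd hd hc2
          · exact hd
        simp only [altCols, if_neg hv, if_neg hc2, if_pos hc3]
    · have ht0 : t ≠ 0 := by
        rintro rfl
        exact hp0 (by simpa using hp)
      obtain ⟨t', rfl⟩ := Nat.exists_eq_succ_of_ne_zero ht0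
      have hnext : ∃ t'' < n, PairAt m w i (j+1+t'') :=
        ⟨t', by omega, by simpa [show j+1+t' = j+(t'+1) by omega] using hp⟩
      by_cases hv : (m.getD i []).getD j 0 = 0 ∨ (m.getD i []).getD j 0 = -1
      · simp only [altCols, if_pos hv]
        exact ih (j+1) h (by omega) hnext
      · have hocc : occV (cellG m i j) := ⟨fun h' => hv (Or.inl h'), fun h' => hv (Or.inr h')⟩
        have hc2 : ¬ (j+1 < w ∧ (m.getD i []).getD (j+1) 0 = (m.getD i []).getD j 0) := by
          rintro ⟨hg, hev⟩
          exact hp0 ⟨hi, hjw, hocc, Or.inl ⟨hg, hev⟩⟩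
        have hc3 : ¬ (i+1 < m.length ∧ (m.getD (i+1) []).getD j 0 = (m.getD i []).getD j 0) := by
          rintro ⟨hg, hev⟩
          exact hp0 ⟨hi, hjw, hocc, Or.inr ⟨hg, hev⟩⟩
        simp only [altCols, if_neg hv, if_neg hc2, if_neg hc3]
        exact ih (j+1) true (by omega) hnext

theorem altRows_np (m : List (List Int)) (w : Nat) (NP : ∀ i j, ¬ PairAt m w i j) :
    ∀ (rows : List (List Int)) (i : Nat) (h : Bool), rows = m.drop i →
      altRows m w rows i h =
        (h || decide (∃ i' < m.length, i ≤ i' ∧ ∃ j < w, occV (cellG m i' j))) := by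
  intro rows
  induction rows with
  | nil =>
    intro i h hdrop
    have hlen : m.length ≤ i := by
      by_contra hlt
      have := List.drop_eq_nil_iff.mp hdrop.symm
      omega
    have : ¬ (∃ i' < m.length, i ≤ i' ∧ ∃ j < w, occV (cellG m i' j)) := by
      rintro ⟨i', hi', hii, -⟩
      omega
    simp [altRows, this]
  | cons row rest ih =>
    intro i h hdrop
    have hi : i < m.length := by
      by_contra hge
      rw [List.drop_eq_nil_iff.mpr (by omega)] at hdrop
      exact List.cons_ne_nil row rest hdrop
    have hrow : m.getD i [] = row := by
      have h0 : (m.drop i)[0]? = some row := by rw [← hdrop]; rfl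
      rw [List.getElem?_drop, Nat.add_zero] at h0
      simp [List.getD_eq_getElem?_getD, h0]
    have hrest : rest = m.drop (i+1) := by
      have : (m.drop i).tail = rest := by rw [← hdrop]; rfl
      rw [← this, List.tail_drop]
    have hcols := altCols_np m w i hi w 0 h (by omega) (fun t ht => NP i (0+t))
    have hrows := ih (i+1) (h || decide (∃ t < w, occV (cellG m i (0+t)))) hrest
    simp only [altRows, hrow ▸ hcols, hrows]
    rw [Bool.or_assoc]
    congr 1
    rw [← Bool.decide_or]
    apply decide_eq_decide.mpr
    constructor
    · rintro (⟨t, ht, ho⟩ | ⟨i', hi', hii, j, hj, ho⟩)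
      · exact ⟨i, hi, le_refl i, t, ht, by simpa using ho⟩
      · exact ⟨i', hi', by omega, j, hj, ho⟩
    · rintro ⟨i', hi', hii, j, hj, ho⟩
      by_cases hieq : i' = i
      · subst hieq
        exact Or.inl ⟨j, hj, by simpa using ho⟩
      · exact Or.inr ⟨i', hi', by omega, j, hj, ho⟩

theorem altRows_pair (m : List (List Int)) (w : Nat) :
    ∀ (rows : List (List Int)) (i : Nat) (h : Bool), rows = m.drop i →
      (∃ i', i ≤ i' ∧ i' < m.length ∧ ∃ j, j < w ∧ PairAt m w i' j) →
      altRows m w rows i h = false := by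
  intro rows
  induction rows with
  | nil =>
    rintro i h hdrop ⟨i', hii, hi', -⟩
    have := List.drop_eq_nil_iff.mp hdrop.symm
    omega
  | cons row rest ih =>
    rintro i h hdrop ⟨i', hii, hi', j, hj, hp⟩
    have hi : i < m.length := by omega
    have hrow : m.getD i [] = row := by
      have h0 : (m.drop i)[0]? = some row := by rw [← hdrop]; rfl
      rw [List.getElem?_drop, Nat.add_zero] at h0
      simp [List.getD_eq_getElem?_getD, h0]
    have hrest : rest = m.drop (i+1) := by
      have : (m.drop i).tail = rest := by rw [← hdrop]; rfl
      rw [← this, List.tail_drop]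
    by_cases hrp : ∃ j' < w, PairAt m w i j'
    · obtain ⟨j', hj', hp'⟩ := hrp
      have hcols := altCols_pair m w i w 0 h (by omega) ⟨j', by omega, by simpa using hp'⟩
      simp only [altRows, hrow ▸ hcols]
    · have hine : i' ≠ i := by
        rintro rfl
        exact hrp ⟨j, hj, hp⟩
      cases hcols : altCols m w row i 0 w h with
      | none => simp [altRows, hcols]
      | some h' =>
        simp only [altRows, hcols]
        exact ih (i+1) h' hrest ⟨i', by omega, hi', j, hj, hp⟩

-- ===== VERDICT (by name: the statement is the Claim_ definition above) =====
theorem isImpossible_spec : Claim_equal_isImpossible := by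
  unfold Claim_equal_isImpossible Spec_isImpossible
  intro M _hdom _hpre
  -- Pre_ matters only on the Python side (A raises outside it); the ports agree on all inputs
  set w := (M.headD []).length with hw
  have hcopy : IsMark M w 0 (copyMat M) := by rw [hw]; exact copyMat_mark M
  have hlenC : (copyMat M).length = M.length := by simp [copyMat]
  have hgroups : board_find_groups M = (bfgRows (M.length * w + 1) (copyMat M) [] 0 M.length).2 := by
    simp only [board_find_groups]
    rw [hlenC, ← hw]
  by_cases hPex : ∃ i j, PairAt M w i j
  · obtain ⟨i0, j0, hp⟩ := hPex
    have hfind : ∃ k, PairAt M w (k / w) (k % w) :=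
      ⟨i0 * w + j0, by rw [(flatIdx_div hp.2.1).1, (flatIdx_div hp.2.1).2]; exact hp⟩
    have hp0 := Nat.find_spec hfind
    have hmin : ∀ i j, PairAt M w i j → Nat.find hfind ≤ i * w + j := by
      intro i j hpij
      exact Nat.find_min' hfind
        (by rw [(flatIdx_div hpij.2.1).1, (flatIdx_div hpij.2.1).2]; exact hpij)
    have hbound : i0 * w + j0 < M.length * w := by
      have h1 : j0 < w := hp.2.1
      have h2 : i0 < M.length := hp.1
      calc i0 * w + j0 < i0 * w + w := by omega
        _ = (i0 + 1) * w := by ring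
        _ ≤ M.length * w := Nat.mul_le_mul_right w (by omega)
    rcases bfgRows_pair M w (M.length * w) (Nat.find hfind) hmin hp0 M.length 0 (copyMat M) []
        (by omega) (by omega) (by simpa using hcopy) with hbig | hle
    · obtain ⟨gr, hgr, h2⟩ := hbig
      have hA : isImpossible M = false := by
        simp only [isImpossible, hgroups]
        rw [if_neg (by simp [List.length_eq_zero_iff]; exact List.ne_nil_of_mem hgr)]
        exact List.all_eq_false.mpr ⟨gr, hgr, by simp; omega⟩
      have hB : isImpossible_alt M = false := by
        show altRows M (M.headD []).length M 0 false = false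
        rw [← hw]
        exact altRows_pair M w M 0 false (by simp) ⟨i0, Nat.zero_le _, hp.1, j0, hp.2.1, hp⟩
      rw [hA, hB]
    · have := hmin i0 j0 hp
      omega
  · have NP : ∀ i j, ¬ PairAt M w i j := fun i j hpij => hPex ⟨i, j, hpij⟩
    have hS := bfgRows_np M w (M.length * w + 1) NP M.length 0 (copyMat M) []
      (by omega) (by simpa using hcopy)
      ⟨fun gr hgr => absurd hgr (List.not_mem_nil (a := gr)),
       iff_of_true rfl (fun i j _ _ hidx => absurd hidx (by omega))⟩
    obtain ⟨hsing, hemp⟩ := hS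
    have hBr := altRows_np M w NP M 0 false (by simp)
    by_cases hg : (bfgRows (M.length * w + 1) (copyMat M) [] 0 M.length).2 = []
    · have hno := hemp.mp hg
      have hA : isImpossible M = false := by
        simp only [isImpossible, hgroups, hg]
        simp
      have hB : isImpossible_alt M = false := by
        show altRows M (M.headD []).length M 0 false = false
        rw [← hw, hBr]
        simp only [Bool.false_or]
        apply decide_eq_false
        rintro ⟨i', hi', -, j, hj, ho⟩
        have hidx : i' * w + j < M.length * w := by
          calc i' * w + j < i' * w + w := by omega
            _ = (i' + 1) * w := by ring
            _ ≤ M.length * w := Nat.mul_le_mul_right w (by omega)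
        exact hno i' j hi' hj hidx ho
      rw [hA, hB]
    · have hA : isImpossible M = true := by
        simp only [isImpossible, hgroups]
        rw [if_neg (by simpa [List.length_eq_zero_iff] using hg)]
        exact List.all_eq_true.mpr (fun gr hgr => by simp [hsing gr hgr])
      have hB : isImpossible_alt M = true := by
        show altRows M (M.headD []).length M 0 false = true
        rw [← hw, hBr]
        simp only [Bool.false_or]
        apply decide_eq_true
        by_contra hno
        apply hg
        apply hemp.mpr
        intro i j hi hj _ ho
        exact hno ⟨i, hi, Nat.zero_le _, j, hj, ho⟩
      rw [hA, hB]
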